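-- pv_equiv track=rewrite | github.com/phazarik/VLLSearch-Run3 | Metadata/run_GenXSecAnalyzer.py | extract_xsec
-- ===== SOURCE A (Python) =====
-- def extract_xsec(output):
--     for line in output.split("\n"):
--         if "After matching: total cross section" in line:
--             parts = line.split("=")
--             if len(parts) > 1: return parts[1].strip()
--     for line in output.split("\n"):
--         if "After filter: final cross section" in line:
--             parts = line.split("=")
--             if len(parts) > 1: return parts[1].strip()
--     return "Not found"
-- ===== SOURCE B (Python) =====
-- def extract_xsec(output):
--     first_match = None
--     first_filter = None
--     for line in output.split("\n"):
--         parts = line.split("=")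
--         if len(parts) > 1:
--             val = parts[1].strip()
--             if first_match is None and "After matching: total cross section" in line:
--                 first_match = val
--             if first_filter is None and "After filter: final cross section" in line:
--                 first_filter = val
--     if first_match is not None:
--         return first_match
--     if first_filter is not None:
--         return first_filter
--     return "Not found"
-- ===== Notes on version B (the rewrite author's own statement) =====
-- stated objective: alternative
-- what changed: B replaces A's two sequential scans over the split lines by a single pass that records the first valid line for each of the two keyword phrases in two accumulators and decides the priority after the loop.
import Mathlib
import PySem

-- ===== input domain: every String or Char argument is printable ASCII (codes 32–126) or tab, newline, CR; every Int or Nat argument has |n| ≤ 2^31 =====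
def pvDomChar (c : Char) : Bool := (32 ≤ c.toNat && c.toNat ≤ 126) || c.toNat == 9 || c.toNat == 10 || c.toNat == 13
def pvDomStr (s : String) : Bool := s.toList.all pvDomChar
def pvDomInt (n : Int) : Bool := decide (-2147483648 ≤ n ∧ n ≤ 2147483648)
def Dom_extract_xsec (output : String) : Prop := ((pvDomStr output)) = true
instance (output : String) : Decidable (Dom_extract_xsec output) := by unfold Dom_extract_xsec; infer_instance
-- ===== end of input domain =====

-- split(sep) with a NONEMPTY literal sep: PySem.Str.split? returns some there, so .getD [] is exact
def pySplit (s sep : String) : List String := (PySem.Str.split? s sep).getD []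

-- B makes one pass over the lines with two accumulators instead of A's two sequential scans; return value only, no side effects.

-- ===== PORT A =====
-- one 'for' loop of A searching for the first line that contains `phrase` and splits into >1 parts
def extract_xsec_scan (phrase : String) : List String → Option String
  | [] => none
  | line :: rest =>
    if PySem.Str.isIn phrase line then
      let parts := pySplit line "="
      if parts.length > 1 then some (PySem.Str.strip (parts.getD 1 ""))
      else extract_xsec_scan phrase rest
    else extract_xsec_scan phrase rest

def extract_xsec (output : String) : String :=
  match extract_xsec_scan "After matching: total cross section" (pySplit output "\n") with
  | some v => v
  | none =>
    match extract_xsec_scan "After filter: final cross section" (pySplit output "\n") with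
    | some v => v
    | none => "Not found"

-- ===== PORT B =====
-- one step of B's single loop: update (first_match, first_filter) from one line
def extract_xsec_step (acc : Option String × Option String) (line : String) : Option String × Option String :=
  let parts := pySplit line "="
  if parts.length > 1 then
    let val := PySem.Str.strip (parts.getD 1 "")
    let fm := match acc.1 with
      | some v => some v
      | none => if PySem.Str.isIn "After matching: total cross section" line then some val else none
    let ff := match acc.2 with
      | some v => some v
      | none => if PySem.Str.isIn "After filter: final cross section" line then some val else none
    (fm, ff)
  else acc

def extract_xsec_alt (output : String) : String :=
  match (pySplit output "\n").foldl extract_xsec_step (none, none) with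
  | (fm, ff) =>
    match fm with
    | some v => v
    | none =>
      match ff with
      | some v => v
      | none => "Not found"

-- ===== PRECONDITION & SPEC =====
def Spec_extract_xsec (output : String) (out : String) : Prop := out = extract_xsec_alt output
instance (output : String) (out : String) : Decidable (Spec_extract_xsec output out) := by unfold Spec_extract_xsec; infer_instance

-- ===== CLAIM (what is proved, stated in full; the proofs are below) =====
def Claim_equal_extract_xsec : Prop := ∀ (output : String), Dom_extract_xsec output → Spec_extract_xsec output (extract_xsec output)

-- ===== LEMMAS AND PROOFS =====

-- the value a single line contributes (if any): contains `phrase` and splits into >1 parts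
def pvHit (phrase line : String) : Option String :=
  if PySem.Str.isIn phrase line then
    let parts := pySplit line "="
    if parts.length > 1 then some (PySem.Str.strip (parts.getD 1 "")) else none
  else none

theorem scan_cons (phrase line : String) (rest : List String) :
    extract_xsec_scan phrase (line :: rest) =
      match pvHit phrase line with
      | some v => some v
      | none => extract_xsec_scan phrase rest := by
  by_cases h1 : PySem.Chars.isIn phrase.toList line.toList = true <;>
    by_cases h2 : (pySplit line "=").length > 1 <;>
      simp [extract_xsec_scan, pvHit, h1, h2]

theorem step_fst (acc : Option String × Option String) (line : String) :
    (extract_xsec_step acc line).1 =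
      match acc.1 with
      | some v => some v
      | none => pvHit "After matching: total cross section" line := by
  rcases acc with ⟨m, f⟩
  by_cases hlen : (pySplit line "=").length > 1 <;>
    cases m <;> simp [extract_xsec_step, pvHit, hlen]

theorem step_snd (acc : Option String × Option String) (line : String) :
    (extract_xsec_step acc line).2 =
      match acc.2 with
      | some v => some v
      | none => pvHit "After filter: final cross section" line := by
  rcases acc with ⟨m, f⟩
  by_cases hlen : (pySplit line "=").length > 1 <;>
    cases f <;> simp [extract_xsec_step, pvHit, hlen]

theorem fold_fst (lines : List String) (m f : Option String) :
    (lines.foldl extract_xsec_step (m, f)).1 =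
      match m with
      | some v => some v
      | none => extract_xsec_scan "After matching: total cross section" lines := by
  induction lines generalizing m f with
  | nil => cases m <;> simp [extract_xsec_scan]
  | cons line rest ih =>
    rw [List.foldl_cons,
        show extract_xsec_step (m, f) line =
          ((extract_xsec_step (m, f) line).1, (extract_xsec_step (m, f) line).2) from rfl,
        ih, step_fst]
    cases m with
    | some v => rfl
    | none =>
      rw [scan_cons]

theorem fold_snd (lines : List String) (m f : Option String) :
    (lines.foldl extract_xsec_step (m, f)).2 =
      match f with
      | some v => some v
      | none => extract_xsec_scan "After filter: final cross section" lines := by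
  induction lines generalizing m f with
  | nil => cases f <;> simp [extract_xsec_scan]
  | cons line rest ih =>
    rw [List.foldl_cons,
        show extract_xsec_step (m, f) line =
          ((extract_xsec_step (m, f) line).1, (extract_xsec_step (m, f) line).2) from rfl,
        ih, step_snd]
    cases f with
    | some v => rfl
    | none =>
      rw [scan_cons]

-- ===== VERDICT (by name: the statement is the Claim_ definition above) =====
theorem extract_xsec_spec : Claim_equal_extract_xsec := by
  intro output _
  unfold Spec_extract_xsec extract_xsec extract_xsec_alt
  have h1 := fold_fst (pySplit output "\n") none none
  have h2 := fold_snd (pySplit output "\n") none none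
  rcases hE : (pySplit output "\n").foldl extract_xsec_step (none, none) with ⟨fm, ff⟩
  rw [hE] at h1 h2
  simp only at h1 h2
  rw [h1, h2]
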